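-- pv_equiv track=rewrite | github.com/andrkrsv/Kontekst4aban_24 | 2/2.py | count_nucle
-- ===== SOURCE A (Python) =====
-- def count_nucle(dno):
--     stop_words = {"UAA", "UAG", "UGA"}
--     result = []
--     chain_len = 0
--
--     for i in range(0, len(dno), 3):
--         condon = dno[i:i+3]
--         if condon in stop_words:
--             result.append(chain_len)
--             chain_len = 0
--         else:
--             chain_len += 3
--     return result
-- ===== SOURCE B (Python) =====
-- def count_nucle(dno):
--     stop_words = {"UAA", "UAG", "UGA"}
--     codons = [dno[i:i + 3] for i in range(0, len(dno), 3)]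
--     groups = [[]]
--     for codon in codons:
--         if codon in stop_words:
--             groups.append([])
--         else:
--             groups[-1].append(codon)
--     return [3 * len(g) for g in groups[:-1]]
-- ===== Notes on version B (the rewrite author's own statement) =====
-- stated objective: alternative
-- what changed: B replaces A's running-counter loop by a split-into-groups decomposition: it builds the codon list, partitions it into consecutive groups separated by stop codons, and maps 3*len over all groups but the last.
import Mathlib
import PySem

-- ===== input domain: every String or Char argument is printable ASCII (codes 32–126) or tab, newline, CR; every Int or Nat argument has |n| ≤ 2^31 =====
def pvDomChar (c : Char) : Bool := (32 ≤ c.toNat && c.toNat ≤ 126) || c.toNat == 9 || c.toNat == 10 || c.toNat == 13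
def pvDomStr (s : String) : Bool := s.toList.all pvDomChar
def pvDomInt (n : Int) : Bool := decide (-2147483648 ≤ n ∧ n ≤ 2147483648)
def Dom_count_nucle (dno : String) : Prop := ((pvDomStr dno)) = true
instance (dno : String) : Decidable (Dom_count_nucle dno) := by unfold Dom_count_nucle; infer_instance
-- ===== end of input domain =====

-- B replaces A's running-counter loop by a split-into-groups decomposition (alternative, same cost).


-- ===== PORT A =====
-- literal transliteration of A: one pass over range(0, len(dno), 3) carrying (result, chain_len)
def count_nucle (dno : String) : List Int :=
  let stop_words : PySem.Set String := PySem.Set.ofList ["UAA", "UAG", "UGA"]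
  let st :=
    (PySem.List.pyRange 0 (PySem.Str.len dno) 3).foldl
      (fun (st : List Int × Int) i =>
        let condon := PySem.Str.slice dno (some i) (some (i + 3))
        if condon ∈ stop_words then (st.1 ++ [st.2], 0)
        else (st.1, st.2 + 3))
      ([], 0)
  st.1

-- ===== PORT B =====
-- literal transliteration of B: codon list, partition into groups split at stop codons, map 3*len
def count_nucle_alt (dno : String) : List Int :=
  let stop_words : PySem.Set String := PySem.Set.ofList ["UAA", "UAG", "UGA"]
  let codons :=
    (PySem.List.pyRange 0 (PySem.Str.len dno) 3).map
      (fun i => PySem.Str.slice dno (some i) (some (i + 3)))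
  let groups :=
    codons.foldl
      (fun (groups : List (List String)) codon =>
        if codon ∈ stop_words then groups ++ [[]]
        else groups.dropLast ++ [groups.getLast! ++ [codon]])  -- groups[-1].append(codon)
      [[]]
  groups.dropLast.map (fun g => 3 * (g.length : Int))

-- ===== PRECONDITION & SPEC =====
def Spec_count_nucle (dno : String) (out : List Int) : Prop := out = count_nucle_alt dno
instance (dno : String) (out : List Int) : Decidable (Spec_count_nucle dno out) := by unfold Spec_count_nucle; infer_instance

-- ===== CLAIM (what is proved, stated in full; the proofs are below) =====
def Claim_equal_count_nucle : Prop := ∀ (dno : String), Dom_count_nucle dno → Spec_count_nucle dno (count_nucle dno)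

-- ===== LEMMAS AND PROOFS =====

-- common abbreviations used only by the proofs
def pvStops : PySem.Set String := PySem.Set.ofList ["UAA", "UAG", "UGA"]

def pvStepA (dno : String) (st : List Int × Int) (i : Int) : List Int × Int :=
  let condon := PySem.Str.slice dno (some i) (some (i + 3))
  if condon ∈ pvStops then (st.1 ++ [st.2], 0) else (st.1, st.2 + 3)

def pvStepB (groups : List (List String)) (codon : String) : List (List String) :=
  if codon ∈ pvStops then groups ++ [[]]
  else groups.dropLast ++ [groups.getLast! ++ [codon]]

-- reference pair-fold: (finished groups, current group)
def pvStepP (st : List (List String) × List String) (codon : String) :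
    List (List String) × List String :=
  if codon ∈ pvStops then (st.1 ++ [st.2], []) else (st.1, st.2 ++ [codon])

def pvW (g : List String) : Int := 3 * (g.length : Int)

-- B's fold, started at done ++ [cur], is the pair-fold with the last group kept separate
theorem pvB_eq_P (L : List String) :
    ∀ (done : List (List String)) (cur : List String),
      L.foldl pvStepB (done ++ [cur]) =
        (L.foldl pvStepP (done, cur)).1 ++ [(L.foldl pvStepP (done, cur)).2] := by
  induction L with
  | nil => intro done cur; rfl
  | cons c L ih =>
      intro done cur
      by_cases h : c ∈ pvStops
      · have hB : pvStepB (done ++ [cur]) c = (done ++ [cur]) ++ [[]] := by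
          simp [pvStepB, h]
        have hP : pvStepP (done, cur) c = (done ++ [cur], []) := by
          simp [pvStepP, h]
        simp only [List.foldl_cons, hB, hP]
        exact ih (done ++ [cur]) []
      · have hB : pvStepB (done ++ [cur]) c = done ++ [cur ++ [c]] := by
          simp [pvStepB, h]
        have hP : pvStepP (done, cur) c = (done, cur ++ [c]) := by
          simp [pvStepP, h]
        simp only [List.foldl_cons, hB, hP]
        exact ih done (cur ++ [c])

-- A's fold tracks the pair-fold through (map pvW, pvW of current group)
theorem pvA_eq_P (dno : String) (L : List Int) :
    ∀ (done : List (List String)) (cur : List String),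
      L.foldl (pvStepA dno) (done.map pvW, pvW cur) =
        (((L.map (fun i => PySem.Str.slice dno (some i) (some (i + 3)))).foldl pvStepP
            (done, cur)).1.map pvW,
         pvW ((L.map (fun i => PySem.Str.slice dno (some i) (some (i + 3)))).foldl pvStepP
            (done, cur)).2) := by
  induction L with
  | nil => intro done cur; rfl
  | cons i L ih =>
      intro done cur
      set c := PySem.Str.slice dno (some i) (some (i + 3)) with hc
      by_cases h : c ∈ pvStops
      · have hA : pvStepA dno (done.map pvW, pvW cur) i = ((done ++ [cur]).map pvW, pvW []) := by
          simp [pvStepA, ← hc, h, pvW]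
        have hP : pvStepP (done, cur) c = (done ++ [cur], []) := by simp [pvStepP, h]
        simp only [List.map_cons, List.foldl_cons, hA, hP, ← hc]
        exact ih (done ++ [cur]) []
      · have hA : pvStepA dno (done.map pvW, pvW cur) i = (done.map pvW, pvW (cur ++ [c])) := by
          simp [pvStepA, ← hc, h, pvW]; ring
        have hP : pvStepP (done, cur) c = (done, cur ++ [c]) := by simp [pvStepP, h]
        simp only [List.map_cons, List.foldl_cons, hA, hP, ← hc]
        exact ih done (cur ++ [c])

-- ===== VERDICT (by name: the statement is the Claim_ definition above) =====
theorem count_nucle_spec : Claim_equal_count_nucle := by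
  intro dno _
  show count_nucle dno = count_nucle_alt dno
  unfold count_nucle count_nucle_alt
  simp only []
  rw [List.foldl_map]
  have hA := pvA_eq_P dno (PySem.List.pyRange 0 (PySem.Str.len dno) 3) [] []
  have hB := pvB_eq_P ((PySem.List.pyRange 0 (PySem.Str.len dno) 3).map
      (fun i => PySem.Str.slice dno (some i) (some (i + 3)))) [] []
  rw [List.foldl_map] at hB
  show ((PySem.List.pyRange 0 (PySem.Str.len dno) 3).foldl (pvStepA dno) ([], 0)).1 =
    ((PySem.List.pyRange 0 (PySem.Str.len dno) 3).foldl
      (fun gs i => pvStepB gs (PySem.Str.slice dno (some i) (some (i + 3)))) ([] ++ [[]])).dropLast.map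
      (fun g => 3 * (g.length : Int))
  rw [hB, List.dropLast_concat]
  have h0 : (([] : List (List String)).map pvW, pvW []) = (([] : List Int), (0 : Int)) := by
    simp [pvW]
  rw [← h0, hA, List.foldl_map]
  rfl
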